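-- pv_equiv track=rewrite | github.com/litao-Albert/movie_scrapy | 公众号发文代码/爬4位数域名.py | get_words_list
-- ===== SOURCE A (Python) =====
-- def get_words_list(words):
--     list=[]
--     for i in words:
--         for j in words:
--             for m in words:
--                 for n in words:
--                     name="{}{}{}{}".format(i,j,m,n)
--                     list.append(name)
--     return list
-- ===== SOURCE B (Python) =====
-- def get_words_list(words):
--     pairs = ["{}{}".format(a, b) for a in words for b in words]
--     return ["{}{}".format(p, q) for p in pairs for q in pairs]
-- ===== Notes on version B (the rewrite author's own statement) =====
-- stated objective: alternative
-- what changed: Replaces the four nested loops by precomputing the n^2 two-token prefix table once and concatenating every prefix with every prefix, preserving the exact i,j,m,n output order.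
import Mathlib
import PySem

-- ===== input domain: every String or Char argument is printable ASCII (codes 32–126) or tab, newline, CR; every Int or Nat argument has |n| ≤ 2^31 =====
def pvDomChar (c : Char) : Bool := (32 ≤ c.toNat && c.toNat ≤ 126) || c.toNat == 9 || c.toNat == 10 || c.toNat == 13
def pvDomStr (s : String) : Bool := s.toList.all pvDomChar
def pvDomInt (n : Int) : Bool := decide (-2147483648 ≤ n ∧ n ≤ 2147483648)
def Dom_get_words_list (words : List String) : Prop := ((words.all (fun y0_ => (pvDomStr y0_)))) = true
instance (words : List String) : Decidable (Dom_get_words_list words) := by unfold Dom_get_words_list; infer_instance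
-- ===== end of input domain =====

-- ===== PORT A =====
-- B builds the n^2 two-token prefix table once and pairs prefixes with prefixes, replacing the four nested loops (alternative decomposition, same output order)
def get_words_list (words : List String) : List String :=
  words.foldl (fun acc i =>
    words.foldl (fun acc j =>
      words.foldl (fun acc m =>
        words.foldl (fun acc n => acc ++ [i ++ j ++ m ++ n]) acc) acc) acc) []

-- ===== PORT B =====
def get_words_list_alt (words : List String) : List String :=
  let pairs := words.flatMap (fun a => words.map (fun b => a ++ b))
  pairs.flatMap (fun p => pairs.map (fun q => p ++ q))

-- ===== PRECONDITION & SPEC =====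
def Spec_get_words_list (words : List String) (out : List String) : Prop := out = get_words_list_alt words
instance (words : List String) (out : List String) : Decidable (Spec_get_words_list words out) := by unfold Spec_get_words_list; infer_instance

-- ===== CLAIM (what is proved, stated in full; the proofs are below) =====
def Claim_equal_get_words_list : Prop := ∀ (words : List String), Dom_get_words_list words → Spec_get_words_list words (get_words_list words)

-- ===== LEMMAS AND PROOFS =====

-- ===== VERDICT (by name: the statement is the Claim_ definition above) =====
theorem get_words_list_spec : Claim_equal_get_words_list := by
  intro words _
  unfold Spec_get_words_list get_words_list get_words_list_alt
  simp only [PySem.List.foldl_append_singleton_eq_map, PySem.List.foldl_append_eq_flatMap,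
        List.flatMap_assoc, List.flatMap_map, List.map_flatMap, List.map_map,
        Function.comp_def, String.append_assoc, List.nil_append]
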